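-- pv_equiv track=rewrite | github.com/Devisree24/Retail_Supplier_Performance_Dashboard | scripts/generate_data.py | get_stores_for_retailer
-- ===== SOURCE A (Python) =====
-- WALMART_STORES = 48
--
-- SAMS_STORES = 28
--
-- COSTCO_STORES = 18
--
-- def get_stores_for_retailer(retailer: str):
--     if retailer == "Walmart":
--         return [f"WMT-{r:02d}-{s:03d}" for r in range(1, 5) for s in range(1, WALMART_STORES // 4 + 4)][:WALMART_STORES]
--     if retailer == "Sam's Club":
--         return [f"SAM-{r:02d}-{s:03d}" for r in range(1, 5) for s in range(1, SAMS_STORES // 4 + 4)][:SAMS_STORES]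
--     if retailer == "Costco":
--         return [f"COST-{r:02d}-{s:03d}" for r in range(1, 5) for s in range(1, COSTCO_STORES // 4 + 3)][:COSTCO_STORES]
--     return []
-- ===== SOURCE B (Python) =====
-- def get_stores_for_retailer(retailer: str):
--     params = {"Walmart": ("WMT", 48, 15), "Sam's Club": ("SAM", 28, 10), "Costco": ("COST", 18, 6)}
--     if retailer not in params:
--         return []
--     prefix, count, per = params[retailer]
--     return [f"{prefix}-{i // per + 1:02d}-{i % per + 1:03d}" for i in range(count)]
-- ===== Notes on version B (the rewrite author's own statement) =====
-- stated objective: simpler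
-- what changed: Replaces the three nested r/s comprehensions plus [:count] truncation with a retailer->(prefix,count,per) lookup and one flat index loop recovering row/store via divmod.
import Mathlib
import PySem

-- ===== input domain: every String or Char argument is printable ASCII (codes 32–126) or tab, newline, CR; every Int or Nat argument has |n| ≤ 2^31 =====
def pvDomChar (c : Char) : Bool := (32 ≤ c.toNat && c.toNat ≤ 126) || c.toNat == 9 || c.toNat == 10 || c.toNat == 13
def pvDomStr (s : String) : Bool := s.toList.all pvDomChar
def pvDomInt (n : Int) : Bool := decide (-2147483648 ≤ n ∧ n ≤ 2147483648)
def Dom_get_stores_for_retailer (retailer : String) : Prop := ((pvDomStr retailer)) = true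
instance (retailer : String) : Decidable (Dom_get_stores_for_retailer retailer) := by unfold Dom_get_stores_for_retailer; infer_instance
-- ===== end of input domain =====

-- B replaces A's nested r/s comprehensions + [:count] slice with a (prefix,count,per) lookup
-- and one flat divmod index loop; objective: simpler.

-- f-string "{n:02d}" for the small non-negative n used here (exact for 0 ≤ n < 100)
def pvFmt2 (n : Int) : String := if n < 10 then "0" ++ PySem.Int.toStr n else PySem.Int.toStr n
-- f-string "{n:03d}" for the small non-negative n used here (exact for 0 ≤ n < 1000)
def pvFmt3 (n : Int) : String :=
  if n < 10 then "00" ++ PySem.Int.toStr n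
  else if n < 100 then "0" ++ PySem.Int.toStr n
  else PySem.Int.toStr n

-- ===== PORT A =====
def WALMART_STORES : Int := 48
def SAMS_STORES : Int := 28
def COSTCO_STORES : Int := 18

def get_stores_for_retailer (retailer : String) : List String :=
  if retailer = "Walmart" then
    (PySem.List.slice ((PySem.List.pyRange 1 5 1).flatMap (fun r =>
      (PySem.List.pyRange 1 (PySem.Int.floordiv WALMART_STORES 4 + 4) 1).map (fun s =>
        "WMT-" ++ pvFmt2 r ++ "-" ++ pvFmt3 s))) none (some WALMART_STORES))
  else if retailer = "Sam's Club" then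
    (PySem.List.slice ((PySem.List.pyRange 1 5 1).flatMap (fun r =>
      (PySem.List.pyRange 1 (PySem.Int.floordiv SAMS_STORES 4 + 4) 1).map (fun s =>
        "SAM-" ++ pvFmt2 r ++ "-" ++ pvFmt3 s))) none (some SAMS_STORES))
  else if retailer = "Costco" then
    (PySem.List.slice ((PySem.List.pyRange 1 5 1).flatMap (fun r =>
      (PySem.List.pyRange 1 (PySem.Int.floordiv COSTCO_STORES 4 + 3) 1).map (fun s =>
        "COST-" ++ pvFmt2 r ++ "-" ++ pvFmt3 s))) none (some COSTCO_STORES))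
  else []

-- ===== PORT B =====
def pvParams : PySem.Dict String (String × Int × Int) :=
  PySem.Dict.ofList [("Walmart", (("WMT" : String), (48 : Int), (15 : Int))), ("Sam's Club", ("SAM", 28, 10)), ("Costco", ("COST", 18, 6))]

def get_stores_for_retailer_alt (retailer : String) : List String :=
  match PySem.Dict.get? pvParams retailer with
  | none => []
  | some (prefix_, count, per) =>
    (PySem.List.pyRange 0 count 1).map (fun i =>
      prefix_ ++ "-" ++ pvFmt2 (PySem.Int.floordiv i per + 1) ++ "-" ++ pvFmt3 (PySem.Int.mod i per + 1))

-- ===== PRECONDITION & SPEC =====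
def Spec_get_stores_for_retailer (retailer : String) (out : List String) : Prop := out = get_stores_for_retailer_alt retailer
instance (retailer : String) (out : List String) : Decidable (Spec_get_stores_for_retailer retailer out) := by unfold Spec_get_stores_for_retailer; infer_instance

-- ===== CLAIM (what is proved, stated in full; the proofs are below) =====
def Claim_equal_get_stores_for_retailer : Prop := ∀ (retailer : String), Dom_get_stores_for_retailer retailer → Spec_get_stores_for_retailer retailer (get_stores_for_retailer retailer)

-- ===== LEMMAS AND PROOFS =====

-- ===== VERDICT (by name: the statement is the Claim_ definition above) =====
theorem get_stores_for_retailer_spec : Claim_equal_get_stores_for_retailer := by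
  intro retailer _
  unfold Spec_get_stores_for_retailer get_stores_for_retailer get_stores_for_retailer_alt
  by_cases h1 : retailer = "Walmart"
  · subst h1; decide
  · by_cases h2 : retailer = "Sam's Club"
    · subst h2; decide
    · by_cases h3 : retailer = "Costco"
      · subst h3; decide
      · simp only [if_neg h1, if_neg h2, if_neg h3]
        have : PySem.Dict.get? pvParams retailer = none := by
          simp [pvParams, PySem.Dict.ofList, PySem.Dict.update, List.foldl, PySem.Dict.get?_insert, PySem.Dict.get?_empty, h1, h2, h3]
        rw [this]
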